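-- pv_equiv track=rewrite | github.com/anmolmishra307680-pixel/anmolmishra307680-pixel-prompt-to-json-backend | src/core/lm_adapter.py | _extract_category_advanced
-- ===== SOURCE A (Python) =====
-- def _extract_category_advanced(prompt: str, design_type: str) -> str:
--     """Advanced category extraction with context awareness"""
--     prompt_lower = prompt.lower()
--
--     if design_type == 'building':
--         if any(word in prompt_lower for word in ['house', 'home', 'residential', 'apartment']):
--             return 'residential'
--         elif any(word in prompt_lower for word in ['office', 'commercial', 'retail', 'warehouse']):
--             return 'commercial'
--         elif any(word in prompt_lower for word in ['factory', 'industrial', 'manufacturing']):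
--             return 'industrial'
--         return 'mixed-use'
--     elif design_type == 'vehicle':
--         if 'electric' in prompt_lower:
--             return 'electric'
--         elif any(word in prompt_lower for word in ['hybrid', 'eco', 'green']):
--             return 'hybrid'
--         elif any(word in prompt_lower for word in ['sports', 'racing', 'performance']):
--             return 'performance'
--         return 'standard'
--     elif design_type == 'electronics':
--         if any(word in prompt_lower for word in ['mobile', 'phone', 'smartphone']):
--             return 'mobile'
--         elif any(word in prompt_lower for word in ['computer', 'laptop', 'desktop']):
--             return 'computing'
--         elif any(word in prompt_lower for word in ['iot', 'smart', 'connected']):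
--             return 'smart_device'
--         return 'consumer'
--     return 'standard'
-- ===== SOURCE B (Python) =====
-- # Flat keyword table, alphabetized by keyword: (design_type, rank, keyword, category).
-- # rank = priority of the rule within its design type (0 wins over 1 wins over 2).
-- KEYWORDS = [
--     ('building',    0, 'apartment',     'residential'),
--     ('building',    1, 'commercial',    'commercial'),
--     ('electronics', 1, 'computer',      'computing'),
--     ('electronics', 2, 'connected',     'smart_device'),
--     ('electronics', 1, 'desktop',       'computing'),
--     ('vehicle',     1, 'eco',           'hybrid'),
--     ('vehicle',     0, 'electric',      'electric'),
--     ('building',    2, 'factory',       'industrial'),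
--     ('vehicle',     1, 'green',         'hybrid'),
--     ('building',    0, 'home',          'residential'),
--     ('building',    0, 'house',         'residential'),
--     ('vehicle',     1, 'hybrid',        'hybrid'),
--     ('building',    2, 'industrial',    'industrial'),
--     ('electronics', 2, 'iot',           'smart_device'),
--     ('electronics', 1, 'laptop',        'computing'),
--     ('building',    2, 'manufacturing', 'industrial'),
--     ('electronics', 0, 'mobile',        'mobile'),
--     ('building',    1, 'office',        'commercial'),
--     ('vehicle',     2, 'performance',   'performance'),
--     ('electronics', 0, 'phone',         'mobile'),
--     ('vehicle',     2, 'racing',        'performance'),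
--     ('building',    0, 'residential',   'residential'),
--     ('building',    1, 'retail',        'commercial'),
--     ('electronics', 2, 'smart',         'smart_device'),
--     ('electronics', 0, 'smartphone',    'mobile'),
--     ('vehicle',     2, 'sports',        'performance'),
--     ('building',    1, 'warehouse',     'commercial'),
-- ]
--
-- DEFAULTS = {'building': 'mixed-use', 'vehicle': 'standard', 'electronics': 'consumer'}
--
--
-- def _extract_category_advanced(prompt: str, design_type: str) -> str:
--     """Advanced category extraction with context awareness"""
--     default = DEFAULTS.get(design_type)
--     if default is None:
--         return 'standard'
--     prompt_lower = prompt.lower()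
--     best_rank, best_cat = 3, default
--     for dt, rank, kw, cat in KEYWORDS:
--         if dt == design_type and rank < best_rank and kw in prompt_lower:
--             best_rank, best_cat = rank, cat
--     return best_cat
-- ===== Notes on version B (the rewrite author's own statement) =====
-- stated objective: alternative
-- what changed: Replaced the three early-return if/elif keyword ladders with a single pass over one flat alphabetized keyword table, maintaining a best-(rank,category) accumulator and returning the minimum-rank match (or the type's default, 'standard' for unknown types).
import Mathlib
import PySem

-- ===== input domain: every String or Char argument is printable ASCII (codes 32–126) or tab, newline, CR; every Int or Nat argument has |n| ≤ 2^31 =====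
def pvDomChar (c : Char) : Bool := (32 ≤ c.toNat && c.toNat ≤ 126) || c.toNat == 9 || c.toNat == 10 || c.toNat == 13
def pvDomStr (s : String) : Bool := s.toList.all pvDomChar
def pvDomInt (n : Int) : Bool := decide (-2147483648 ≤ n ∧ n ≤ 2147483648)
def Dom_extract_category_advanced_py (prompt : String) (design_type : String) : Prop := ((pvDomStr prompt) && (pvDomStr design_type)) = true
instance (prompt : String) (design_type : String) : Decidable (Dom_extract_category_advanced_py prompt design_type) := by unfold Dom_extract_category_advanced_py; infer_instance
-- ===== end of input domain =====

-- B replaces A's three early-return if/elif keyword ladders with a single pass over one flat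
-- alphabetized keyword table, keeping a minimum-rank (rank, category) accumulator (objective: alternative).

-- ===== PORT A =====
def extract_category_advanced_py (prompt : String) (design_type : String) : String :=
  let prompt_lower := PySem.Str.lower prompt
  if design_type == "building" then
    if (["house", "home", "residential", "apartment"].any fun word => PySem.Str.isIn word prompt_lower) then
      "residential"
    else if (["office", "commercial", "retail", "warehouse"].any fun word => PySem.Str.isIn word prompt_lower) then
      "commercial"
    else if (["factory", "industrial", "manufacturing"].any fun word => PySem.Str.isIn word prompt_lower) then
      "industrial"
    else "mixed-use"
  else if design_type == "vehicle" then
    if PySem.Str.isIn "electric" prompt_lower then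
      "electric"
    else if (["hybrid", "eco", "green"].any fun word => PySem.Str.isIn word prompt_lower) then
      "hybrid"
    else if (["sports", "racing", "performance"].any fun word => PySem.Str.isIn word prompt_lower) then
      "performance"
    else "standard"
  else if design_type == "electronics" then
    if (["mobile", "phone", "smartphone"].any fun word => PySem.Str.isIn word prompt_lower) then
      "mobile"
    else if (["computer", "laptop", "desktop"].any fun word => PySem.Str.isIn word prompt_lower) then
      "computing"
    else if (["iot", "smart", "connected"].any fun word => PySem.Str.isIn word prompt_lower) then
      "smart_device"
    else "consumer"
  else "standard"

-- ===== PORT B =====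
-- Source B's flat keyword table, alphabetized by keyword: (design_type, rank, keyword, category)
def pvKeywords : List (String × Int × String × String) :=
  [("building",    0, "apartment",     "residential"),
   ("building",    1, "commercial",    "commercial"),
   ("electronics", 1, "computer",      "computing"),
   ("electronics", 2, "connected",     "smart_device"),
   ("electronics", 1, "desktop",       "computing"),
   ("vehicle",     1, "eco",           "hybrid"),
   ("vehicle",     0, "electric",      "electric"),
   ("building",    2, "factory",       "industrial"),
   ("vehicle",     1, "green",         "hybrid"),
   ("building",    0, "home",          "residential"),
   ("building",    0, "house",         "residential"),
   ("vehicle",     1, "hybrid",        "hybrid"),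
   ("building",    2, "industrial",    "industrial"),
   ("electronics", 2, "iot",           "smart_device"),
   ("electronics", 1, "laptop",        "computing"),
   ("building",    2, "manufacturing", "industrial"),
   ("electronics", 0, "mobile",        "mobile"),
   ("building",    1, "office",        "commercial"),
   ("vehicle",     2, "performance",   "performance"),
   ("electronics", 0, "phone",         "mobile"),
   ("vehicle",     2, "racing",        "performance"),
   ("building",    0, "residential",   "residential"),
   ("building",    1, "retail",        "commercial"),
   ("electronics", 2, "smart",         "smart_device"),
   ("electronics", 0, "smartphone",    "mobile"),
   ("vehicle",     2, "sports",        "performance"),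
   ("building",    1, "warehouse",     "commercial")]

-- Source B's DEFAULTS dict
def pvDefaults : PySem.Dict String String :=
  PySem.Dict.mk [("building", "mixed-use"), ("vehicle", "standard"), ("electronics", "consumer")]

-- the body of Source B's 'for dt, rank, kw, cat in KEYWORDS' loop: keep the better (lower-rank) match
def pvStep (design_type : String) (f : String → Bool) (b : Int × String)
    (e : String × Int × String × String) : Int × String :=
  if e.1 == design_type && e.2.1 < b.1 && f e.2.2.1 then (e.2.1, e.2.2.2) else b

-- the whole loop: fold pvStep over the table from the sentinel (3, default), return the category
def pvScan (design_type : String) (f : String → Bool) (default : String) : String :=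
  (pvKeywords.foldl (pvStep design_type f) (3, default)).2

def extract_category_advanced_py_alt (prompt : String) (design_type : String) : String :=
  match PySem.Dict.get? pvDefaults design_type with
  | none => "standard"
  | some default =>
    pvScan design_type (fun kw => PySem.Str.isIn kw (PySem.Str.lower prompt)) default

-- ===== PRECONDITION & SPEC =====
def Spec_extract_category_advanced_py (prompt : String) (design_type : String) (out : String) : Prop := out = extract_category_advanced_py_alt prompt design_type
instance (prompt : String) (design_type : String) (out : String) : Decidable (Spec_extract_category_advanced_py prompt design_type out) := by unfold Spec_extract_category_advanced_py; infer_instance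

-- ===== CLAIM (what is proved, stated in full; the proofs are below) =====
def Claim_equal_extract_category_advanced_py : Prop := ∀ (prompt : String) (design_type : String), Dom_extract_category_advanced_py prompt design_type → Spec_extract_category_advanced_py prompt design_type (extract_category_advanced_py prompt design_type)

-- ===== LEMMAS AND PROOFS =====
theorem pvStep_congr (dt : String) (f g : String → Bool) (b : Int × String)
    (e : String × Int × String × String) (h : e.1 = dt → f e.2.2.1 = g e.2.2.1) :
    pvStep dt f b e = pvStep dt g b e := by
  by_cases hd : e.1 = dt
  · unfold pvStep; rw [h hd]
  · simp [pvStep, hd]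

theorem foldl_step_congr (l : List (String × Int × String × String)) (dt : String)
    (f g : String → Bool) (h : ∀ e ∈ l, e.1 = dt → f e.2.2.1 = g e.2.2.1) :
    ∀ init, l.foldl (pvStep dt f) init = l.foldl (pvStep dt g) init := by
  induction l with
  | nil => intro init; rfl
  | cons e t ih =>
    intro init
    simp only [List.foldl_cons]
    rw [pvStep_congr dt f g init e (h e (List.mem_cons_self ..))]
    exact ih (fun x hx => h x (List.mem_cons_of_mem _ hx)) _

def pvSelB (b1 b2 b3 b4 b5 b6 b7 b8 b9 b10 b11 : Bool) (kw : String) : Bool :=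
  if kw == "apartment" then b1 else if kw == "commercial" then b2 else if kw == "factory" then b3
  else if kw == "home" then b4 else if kw == "house" then b5 else if kw == "industrial" then b6
  else if kw == "manufacturing" then b7 else if kw == "office" then b8 else if kw == "residential" then b9
  else if kw == "retail" then b10 else if kw == "warehouse" then b11 else false

def pvSelV (b1 b2 b3 b4 b5 b6 b7 : Bool) (kw : String) : Bool :=
  if kw == "eco" then b1 else if kw == "electric" then b2 else if kw == "green" then b3
  else if kw == "hybrid" then b4 else if kw == "performance" then b5 else if kw == "racing" then b6
  else if kw == "sports" then b7 else false

def pvSelE (b1 b2 b3 b4 b5 b6 b7 b8 b9 : Bool) (kw : String) : Bool :=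
  if kw == "computer" then b1 else if kw == "connected" then b2 else if kw == "desktop" then b3
  else if kw == "iot" then b4 else if kw == "laptop" then b5 else if kw == "mobile" then b6
  else if kw == "phone" then b7 else if kw == "smart" then b8 else if kw == "smartphone" then b9
  else false

set_option maxHeartbeats 2000000 in
theorem pvKeyB : ∀ b1 b2 b3 b4 b5 b6 b7 b8 b9 b10 b11 : Bool,
    pvScan "building" (pvSelB b1 b2 b3 b4 b5 b6 b7 b8 b9 b10 b11) "mixed-use" =
      (if ["house", "home", "residential", "apartment"].any
            (pvSelB b1 b2 b3 b4 b5 b6 b7 b8 b9 b10 b11) then "residential"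
       else if ["office", "commercial", "retail", "warehouse"].any
            (pvSelB b1 b2 b3 b4 b5 b6 b7 b8 b9 b10 b11) then "commercial"
       else if ["factory", "industrial", "manufacturing"].any
            (pvSelB b1 b2 b3 b4 b5 b6 b7 b8 b9 b10 b11) then "industrial"
       else "mixed-use") := by decide

set_option maxHeartbeats 1000000 in
theorem pvKeyV : ∀ b1 b2 b3 b4 b5 b6 b7 : Bool,
    pvScan "vehicle" (pvSelV b1 b2 b3 b4 b5 b6 b7) "standard" =
      (if pvSelV b1 b2 b3 b4 b5 b6 b7 "electric" then "electric"
       else if ["hybrid", "eco", "green"].any (pvSelV b1 b2 b3 b4 b5 b6 b7) then "hybrid"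
       else if ["sports", "racing", "performance"].any (pvSelV b1 b2 b3 b4 b5 b6 b7) then "performance"
       else "standard") := by decide

set_option maxHeartbeats 1000000 in
theorem pvKeyE : ∀ b1 b2 b3 b4 b5 b6 b7 b8 b9 : Bool,
    pvScan "electronics" (pvSelE b1 b2 b3 b4 b5 b6 b7 b8 b9) "consumer" =
      (if ["mobile", "phone", "smartphone"].any (pvSelE b1 b2 b3 b4 b5 b6 b7 b8 b9) then "mobile"
       else if ["computer", "laptop", "desktop"].any (pvSelE b1 b2 b3 b4 b5 b6 b7 b8 b9) then "computing"
       else if ["iot", "smart", "connected"].any (pvSelE b1 b2 b3 b4 b5 b6 b7 b8 b9) then "smart_device"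
       else "consumer") := by decide

theorem pvScan_building (f : String → Bool) :
    pvScan "building" f "mixed-use" =
      (if ["house", "home", "residential", "apartment"].any f then "residential"
       else if ["office", "commercial", "retail", "warehouse"].any f then "commercial"
       else if ["factory", "industrial", "manufacturing"].any f then "industrial"
       else "mixed-use") := by
  have hc : pvScan "building" f "mixed-use" =
      pvScan "building" (pvSelB (f "apartment") (f "commercial") (f "factory") (f "home")
        (f "house") (f "industrial") (f "manufacturing") (f "office") (f "residential")
        (f "retail") (f "warehouse")) "mixed-use" := by
    unfold pvScan
    rw [foldl_step_congr]
    intro e he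
    fin_cases he <;> intro hd <;> first | rfl | exact absurd hd (by decide)
  rw [hc, pvKeyB]
  simp only [List.any_cons, List.any_nil, pvSelB]
  rfl

theorem pvScan_vehicle (f : String → Bool) :
    pvScan "vehicle" f "standard" =
      (if f "electric" then "electric"
       else if ["hybrid", "eco", "green"].any f then "hybrid"
       else if ["sports", "racing", "performance"].any f then "performance"
       else "standard") := by
  have hc : pvScan "vehicle" f "standard" =
      pvScan "vehicle" (pvSelV (f "eco") (f "electric") (f "green") (f "hybrid")
        (f "performance") (f "racing") (f "sports")) "standard" := by
    unfold pvScan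
    rw [foldl_step_congr]
    intro e he
    fin_cases he <;> intro hd <;> first | rfl | exact absurd hd (by decide)
  rw [hc, pvKeyV]
  simp only [List.any_cons, List.any_nil, pvSelV]
  rfl

theorem pvScan_electronics (f : String → Bool) :
    pvScan "electronics" f "consumer" =
      (if ["mobile", "phone", "smartphone"].any f then "mobile"
       else if ["computer", "laptop", "desktop"].any f then "computing"
       else if ["iot", "smart", "connected"].any f then "smart_device"
       else "consumer") := by
  have hc : pvScan "electronics" f "consumer" =
      pvScan "electronics" (pvSelE (f "computer") (f "connected") (f "desktop") (f "iot")
        (f "laptop") (f "mobile") (f "phone") (f "smart") (f "smartphone")) "consumer" := by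
    unfold pvScan
    rw [foldl_step_congr]
    intro e he
    fin_cases he <;> intro hd <;> first | rfl | exact absurd hd (by decide)
  rw [hc, pvKeyE]
  simp only [List.any_cons, List.any_nil, pvSelE]
  rfl

theorem extract_eq_alt (prompt design_type : String) :
    extract_category_advanced_py prompt design_type = extract_category_advanced_py_alt prompt design_type := by
  unfold extract_category_advanced_py extract_category_advanced_py_alt pvDefaults
  by_cases hb : design_type = "building"
  · subst hb
    simp only [PySem.Dict.get?_mk_cons, beq_self_eq_true, if_true]
    rw [pvScan_building]
  · by_cases hv : design_type = "vehicle"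
    · subst hv
      simp only [PySem.Dict.get?_mk_cons, String.reduceBEq, beq_self_eq_true, if_true, if_false,
        Bool.false_eq_true]
      rw [pvScan_vehicle]
    · by_cases he : design_type = "electronics"
      · subst he
        simp only [PySem.Dict.get?_mk_cons, String.reduceBEq, beq_self_eq_true, if_true, if_false,
          Bool.false_eq_true]
        rw [pvScan_electronics]
      · simp [PySem.Dict.get?, hb, hv, he, Ne.symm hb, Ne.symm hv, Ne.symm he]

-- ===== VERDICT (by name: the statement is the Claim_ definition above) =====
theorem extract_category_advanced_py_spec : Claim_equal_extract_category_advanced_py := by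
  intro prompt design_type _
  unfold Spec_extract_category_advanced_py
  exact extract_eq_alt prompt design_type
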